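-- pv_equiv track=rewrite | github.com/codervega/dsa-boost | p4.py | xorapproch
-- ===== SOURCE A (Python) =====
-- def xorapproch(arr,n):
--    xor1 = 0
--    xor2 = 0
--    for i in range(n):
--       xor2 ^= arr[i]
--       xor1 ^= (i+1)
--       xor2 *= n
--
--    return xor1^xor2
-- ===== SOURCE B (Python) =====
-- def xorapproch(arr, n):
--     if n <= 0:
--         xor1 = 0
--     else:
--         r = n % 4
--         xor1 = n if r == 0 else 1 if r == 1 else n + 1 if r == 2 else 0
--     xor2 = 0
--     for i in range(n):
--         xor2 = (xor2 ^ arr[i]) * n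
--     return xor1 ^ xor2
-- ===== Notes on version B (the rewrite author's own statement) =====
-- stated objective: simpler
-- what changed: xor1 (the XOR of 1..n) is computed by the closed-form n%4 formula instead of being accumulated inside the loop, so the loop carries only the xor2 state.
import Mathlib
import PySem

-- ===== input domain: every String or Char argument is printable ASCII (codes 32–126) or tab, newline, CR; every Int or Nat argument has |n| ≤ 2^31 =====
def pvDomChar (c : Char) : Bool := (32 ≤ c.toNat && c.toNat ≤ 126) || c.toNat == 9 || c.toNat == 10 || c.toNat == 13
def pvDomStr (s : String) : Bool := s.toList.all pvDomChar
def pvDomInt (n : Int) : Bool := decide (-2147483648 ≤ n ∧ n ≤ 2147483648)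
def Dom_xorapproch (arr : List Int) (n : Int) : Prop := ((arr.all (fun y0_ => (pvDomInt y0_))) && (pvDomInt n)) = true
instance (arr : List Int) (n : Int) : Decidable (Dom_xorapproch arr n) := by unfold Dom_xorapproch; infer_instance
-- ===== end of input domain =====

-- B replaces A's in-loop accumulation of xor1 = XOR of 1..n by the n%4 closed form; objective: simpler loop state.

-- ===== PORT A =====
def xorapproch (arr : List Int) (n : Int) : Int :=
  let s := (PySem.List.pyRange 0 n 1).foldl
    (fun (p : Int × Int) i =>
      (PySem.Int.bxor p.1 (i + 1),
       PySem.Int.bxor p.2 (PySem.List.pyGetD arr i 0) * n))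
    (0, 0)
  PySem.Int.bxor s.1 s.2

-- ===== PORT B =====
def xorapproch_alt (arr : List Int) (n : Int) : Int :=
  let xor1 : Int :=
    if n ≤ 0 then 0
    else
      let r := PySem.Int.mod n 4
      if r = 0 then n else if r = 1 then 1 else if r = 2 then n + 1 else 0
  let xor2 : Int := (PySem.List.pyRange 0 n 1).foldl
    (fun x2 i => PySem.Int.bxor x2 (PySem.List.pyGetD arr i 0) * n) 0
  PySem.Int.bxor xor1 xor2

-- ===== PRECONDITION & SPEC =====
-- Pre_ excludes n > len(arr): there Python A raises IndexError at arr[i].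
def Pre_xorapproch (arr : List Int) (n : Int) : Prop := n ≤ (arr.length : Int)
instance (arr : List Int) (n : Int) : Decidable (Pre_xorapproch arr n) := by unfold Pre_xorapproch; infer_instance
def pvWitness_xorapproch : List Int × Int := ([3, 1, 4], 3)
def Spec_xorapproch (arr : List Int) (n : Int) (out : Int) : Prop := out = xorapproch_alt arr n
instance (arr : List Int) (n : Int) (out : Int) : Decidable (Spec_xorapproch arr n out) := by unfold Spec_xorapproch; infer_instance

-- ===== CLAIM (what is proved, stated in full; the proofs are below) =====
def Claim_equal_xorapproch : Prop := ∀ (arr : List Int) (n : Int), Dom_xorapproch arr n → Pre_xorapproch arr n → Spec_xorapproch arr n (xorapproch arr n)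

-- ===== LEMMAS AND PROOFS =====

-- closed form for XOR of 1..k over Nat
def pvXorTo (k : Nat) : Nat :=
  if k % 4 = 0 then k else if k % 4 = 1 then 1 else if k % 4 = 2 then k + 1 else 0

lemma pvXor_even_succ (m : Nat) : (2*m) ^^^ (2*m+1) = 1 := by
  apply Nat.eq_of_testBit_eq
  intro i
  rw [Nat.testBit_xor]
  cases i with
  | zero => simp
  | succ j =>
    have h1 : (2*m)/2 = m := by omega
    have h2 : (2*m+1)/2 = m := by omega
    simp [Nat.testBit_succ, h1, h2]

lemma pvXor_one_4m2 (m : Nat) : 1 ^^^ (4*m+2) = 4*m+3 := by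
  apply Nat.eq_of_testBit_eq
  intro i
  rw [Nat.testBit_xor]
  cases i with
  | zero =>
    have e1 : 4*m % 2 = 0 := by omega
    have e2 : (4*m+3) % 2 = 1 := by omega
    simp [Nat.testBit_zero, e1, e2]
  | succ j =>
    have h1 : (4*m+2)/2 = 2*m+1 := by omega
    have h2 : (4*m+3)/2 = 2*m+1 := by omega
    simp [Nat.testBit_succ, h1, h2]

lemma pvXorTo_spec (k : Nat) :
    (List.range k).foldl (fun a i => a ^^^ (i+1)) 0 = pvXorTo k := by
  induction k with
  | zero => simp [pvXorTo]
  | succ k ih =>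
    rw [List.range_succ, List.foldl_append, ih]
    simp only [List.foldl_cons, List.foldl_nil]
    have h4 : k % 4 = 0 ∨ k % 4 = 1 ∨ k % 4 = 2 ∨ k % 4 = 3 := by omega
    rcases h4 with h | h | h | h
    · obtain ⟨m, rfl⟩ : ∃ m, k = 4*m := ⟨k/4, by omega⟩
      have e1 : (4*m) % 4 = 0 := by omega
      have e2 : (4*m+1) % 4 = 1 := by omega
      have := pvXor_even_succ (2*m)
      simp [pvXorTo, e1, e2]
      calc (4*m) ^^^ (4*m+1) = 2*(2*m) ^^^ (2*(2*m)+1) := by ring_nf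
        _ = 1 := pvXor_even_succ (2*m)
    · obtain ⟨m, rfl⟩ : ∃ m, k = 4*m+1 := ⟨k/4, by omega⟩
      have e1 : (4*m+1) % 4 = 1 := by omega
      have e2 : (4*m+1+1) % 4 = 2 := by omega
      simp [pvXorTo, e1, e2]
      calc (1:Nat) ^^^ (4*m+1+1) = 1 ^^^ (4*m+2) := by ring_nf
        _ = 4*m+3 := pvXor_one_4m2 m
        _ = 4*m+1+1+1 := by ring
    · obtain ⟨m, rfl⟩ : ∃ m, k = 4*m+2 := ⟨k/4, by omega⟩
      have e1 : (4*m+2) % 4 = 2 := by omega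
      have e2 : (4*m+2+1) % 4 = 3 := by omega
      simp [pvXorTo, e1, e2]
    · obtain ⟨m, rfl⟩ : ∃ m, k = 4*m+3 := ⟨k/4, by omega⟩
      have e1 : (4*m+3) % 4 = 3 := by omega
      have e2 : (4*m+3+1) % 4 = 0 := by omega
      simp [pvXorTo, e1, e2]

-- A's pair fold splits into two independent folds
lemma pv_pair_fold (f g : Int → Int → Int) (l : List Int) : ∀ (a b : Int),
    l.foldl (fun p i => (f p.1 i, g p.2 i)) (a, b) = (l.foldl f a, l.foldl g b) := by
  induction l with
  | nil => intro a b; rfl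
  | cons x xs ih =>
    intro a b
    simp only [List.foldl_cons]
    exact ih (f a x) (g b x)

-- the xor1 fold, cast through Nat
lemma pv_cast_fold (l : List Nat) : ∀ (a : Nat),
    l.foldl (fun (x : Int) (k : Nat) => PySem.Int.bxor x (0 + (k:Int) + 1)) (a : Int)
      = ((l.foldl (fun x k => x ^^^ (k+1)) a : Nat) : Int) := by
  induction l with
  | nil => intro a; rfl
  | cons x xs ih =>
    intro a
    simp only [List.foldl_cons]
    have h : PySem.Int.bxor (a:Int) (0 + (x:Int) + 1) = ((a ^^^ (x+1) : Nat) : Int) := by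
      have e : (0:Int) + (x:Int) + 1 = ((x+1 : Nat) : Int) := by push_cast; ring
      rw [e, PySem.Int.bxor_natCast]
    rw [h, ih]

lemma pv_xor1_closed' (n : Int) :
    (PySem.List.pyRange 0 n 1).foldl (fun a i => PySem.Int.bxor a (i+1)) 0
      = ((pvXorTo n.toNat : Nat) : Int) := by
  rw [PySem.List.pyRange_one]
  simp only [sub_zero]
  rw [List.foldl_map]
  have h := pv_cast_fold (List.range n.toNat) 0
  simp only [Nat.cast_zero] at h
  rw [h, pvXorTo_spec]

-- B's closed form equals pvXorTo for positive n
lemma pv_alt_xor1 (n : Int) (hn : 0 < n) :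
    (if PySem.Int.mod n 4 = 0 then n else if PySem.Int.mod n 4 = 1 then 1
      else if PySem.Int.mod n 4 = 2 then n + 1 else 0)
      = ((pvXorTo n.toNat : Nat) : Int) := by
  obtain ⟨k, rfl⟩ : ∃ k : Nat, n = (k:Int) := ⟨n.toNat, by omega⟩
  have hm : PySem.Int.mod (k:Int) (4:Int) = ((k % 4 : Nat) : Int) := by
    exact_mod_cast PySem.Int.mod_natCast k 4
  rw [hm]
  have h4 : k % 4 = 0 ∨ k % 4 = 1 ∨ k % 4 = 2 ∨ k % 4 = 3 := by omega
  rcases h4 with h | h | h | h <;>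
    simp [h, pvXorTo]

-- ===== VERDICT (by name: the statement is the Claim_ definition above) =====
theorem xorapproch_spec : Claim_equal_xorapproch := by
  intro arr n _ _
  unfold Spec_xorapproch xorapproch xorapproch_alt
  by_cases hn : n ≤ 0
  · rw [PySem.List.pyRange_one_eq_nil (by omega : n ≤ 0)]
    simp [hn]
  · simp only []
    rw [pv_pair_fold (fun a i => PySem.Int.bxor a (i + 1))
        (fun b i => PySem.Int.bxor b (PySem.List.pyGetD arr i 0) * n) (PySem.List.pyRange 0 n 1) 0 0]
    simp only [if_neg hn]
    rw [pv_xor1_closed' n, pv_alt_xor1 n (by omega)]
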